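-- pv_equiv track=rewrite | github.com/higuseonhye/coding_test | 프로그래머스/unrated/132265. 롤케이크 자르기/롤케이크 자르기.py | solution
-- ===== SOURCE A (Python) =====
-- def solution(topping):
--     answer = 0
--     forward = set()
--     backward = {}
--     for i in topping:
--         backward[i] = backward.get(i, 0) + 1
--     for i in topping:
--         forward.add(i)
--         backward[i] -= 1
--         if backward[i] == 0:
--             del backward[i]
--         if len(forward) == len(backward):
--             answer += 1
--     return answer
-- ===== SOURCE B (Python) =====
-- def solution(topping):
--     # suffix[i] = number of distinct toppings strictly after position i
--     suffix = []
--     seen = set()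
--     for t in reversed(topping):
--         suffix.append(len(seen))
--         seen.add(t)
--     suffix.reverse()
--     prefix = set()
--     answer = 0
--     for i, t in enumerate(topping):
--         prefix.add(t)
--         if len(prefix) == suffix[i]:
--             answer += 1
--     return answer
-- ===== Notes on version B (the rewrite author's own statement) =====
-- stated objective: alternative
-- what changed: Replaces A's decrementing Counter of the right half with a precomputed suffix-distinct-count array (right-to-left set pass) plus a forward prefix-set pass comparing against that array.
import Mathlib
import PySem

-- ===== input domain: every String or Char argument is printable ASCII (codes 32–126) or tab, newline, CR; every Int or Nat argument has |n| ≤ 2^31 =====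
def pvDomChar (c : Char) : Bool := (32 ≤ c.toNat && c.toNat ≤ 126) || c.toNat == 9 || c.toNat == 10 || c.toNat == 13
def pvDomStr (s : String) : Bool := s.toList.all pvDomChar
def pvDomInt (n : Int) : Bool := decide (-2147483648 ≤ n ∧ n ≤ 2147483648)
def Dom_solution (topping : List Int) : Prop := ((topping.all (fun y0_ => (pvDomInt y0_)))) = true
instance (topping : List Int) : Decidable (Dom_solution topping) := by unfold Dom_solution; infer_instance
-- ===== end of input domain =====

-- B replaces A's decrementing right-side Counter with a precomputed suffix-distinct-count
-- array (right-to-left set pass) plus a forward prefix-set pass; same O(n) cost, different structure.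

-- ===== PORT A =====
-- A's `backward[i] -= 1` is ported as modify with default 0: the key is always present there
-- (the counter still counts the occurrence being processed), so the default is never used.
def solStepA (st : Int × PySem.Set Int × PySem.Dict Int Int) (i : Int) :
    Int × PySem.Set Int × PySem.Dict Int Int :=
  let forward := PySem.Set.add st.2.1 i
  let bw1 := (st.2.2).modify i 0 (· - 1)
  let bw2 := if bw1.getD i 0 = 0 then bw1.erase i else bw1
  let ans := if forward.length = bw2.size then st.1 + 1 else st.1
  (ans, forward, bw2)

def solution (topping : List Int) : Int :=
  let backward := topping.foldl (fun d i => d.insert i (d.getD i 0 + 1)) PySem.Dict.empty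
  (topping.foldl solStepA (0, ([] : PySem.Set Int), backward)).1

-- ===== PORT B =====
-- suffix[i] = number of distinct toppings strictly after position i (built right-to-left)
def altSuffix (topping : List Int) : List Int :=
  ((topping.reverse.foldl
      (fun (st : List Int × PySem.Set Int) t =>
        (st.1 ++ [(st.2.length : Int)], PySem.Set.add st.2 t))
      ([], ([] : PySem.Set Int))).1).reverse

def solStepB (suffix : List Int) (st : Int × PySem.Set Int) (p : Int × Int) : Int × PySem.Set Int :=
  let pre := PySem.Set.add st.2 p.2
  (if (pre.length : Int) = PySem.List.pyGetD suffix p.1 0 then st.1 + 1 else st.1, pre)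

def solution_alt (topping : List Int) : Int :=
  ((PySem.List.enumerate topping 0).foldl (solStepB (altSuffix topping))
      (0, ([] : PySem.Set Int))).1

-- ===== PRECONDITION & SPEC =====
def Spec_solution (topping : List Int) (out : Int) : Prop := out = solution_alt topping
instance (topping : List Int) (out : Int) : Decidable (Spec_solution topping out) := by unfold Spec_solution; infer_instance

-- ===== CLAIM (what is proved, stated in full; the proofs are below) =====
def Claim_equal_solution : Prop := ∀ (topping : List Int), Dom_solution topping → Spec_solution topping (solution topping)

-- ===== LEMMAS AND PROOFS =====

-- number of distinct elements of a list
def dcount (l : List Int) : Nat := (PySem.Set.ofList l).length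

-- the common specification both loops compute: walking `rest` with processed prefix `pre`,
-- count the cut points where the two halves have equally many distinct toppings
def pvCnt : List Int → List Int → Int
  | _, [] => 0
  | pre, x :: rest =>
      (if dcount (pre ++ [x]) = dcount rest then 1 else 0) + pvCnt (pre ++ [x]) rest

lemma dcount_perm {xs ys : List Int} (h : xs.Perm ys) : dcount xs = dcount ys := by
  unfold dcount
  have hp : (PySem.Set.ofList xs).Perm (PySem.Set.ofList ys) := by
    rw [List.perm_ext_iff_of_nodup (PySem.Set.nodup_ofList xs) (PySem.Set.nodup_ofList ys)]
    intro a
    simp [PySem.Set.mem_ofList, h.mem_iff]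
  exact hp.length_eq

-- Dict.erase at the items level
lemma dict_items_erase (d : PySem.Dict Int Int) (k : Int) :
    (d.erase k).items = d.items.filter (fun p => !(p.1 == k)) := by
  simp [PySem.Dict.erase]

lemma dict_keys_erase (d : PySem.Dict Int Int) (k : Int) :
    (d.erase k).keys = d.keys.filter (fun x => !(x == k)) := by
  have h : ∀ l : List (Int × Int),
      (l.filter (fun p => !(p.1 == k))).map (·.1) = (l.map (·.1)).filter (fun x => !(x == k)) := by
    intro l
    induction l with
    | nil => rfl
    | cons p t ih => by_cases hp : p.1 = k <;> simp [hp, ih]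
  simp [PySem.Dict.keys, dict_items_erase, h]

lemma dict_get?_erase (d : PySem.Dict Int Int) (k j : Int) :
    (d.erase k).get? j = if j = k then none else d.get? j := by
  obtain ⟨l⟩ := d
  have hstep : ∀ t : List (Int × Int), (PySem.Dict.mk t).erase k
      = PySem.Dict.mk (t.filter (fun q => !(q.1 == k))) := by
    intro t; apply PySem.Dict.ext; simp [dict_items_erase]
  induction l with
  | nil => by_cases hj : j = k <;> simp [hstep, PySem.Dict.get?, hj]
  | cons p t ih =>
      obtain ⟨a, b⟩ := p
      rw [hstep] at ih ⊢
      by_cases hp : a = k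
      · rw [show ((a, b) :: t).filter (fun q => !(q.1 == k)) = t.filter (fun q => !(q.1 == k)) by
          simp [hp]]
        rw [ih]
        by_cases hj : j = k
        · simp [hj]
        · rw [if_neg hj, if_neg hj, PySem.Dict.get?_mk_cons,
              if_neg (by simp [hp]; exact fun h => hj h.symm)]
      · rw [show ((a, b) :: t).filter (fun q => !(q.1 == k)) = (a, b) :: t.filter (fun q => !(q.1 == k)) by
          simp [hp]]
        by_cases hpj : a = j
        · have hj : ¬ j = k := by rw [← hpj]; exact hp
          simp [PySem.Dict.get?_mk_cons, hpj, hj]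
        · rw [PySem.Dict.get?_mk_cons, if_neg (by simpa using hpj), ih]
          by_cases hj : j = k
          · simp [hj]
          · simp [PySem.Dict.get?_mk_cons, hj, if_neg (by simpa using hpj)]

lemma dict_getD_erase (d : PySem.Dict Int Int) (k j : Int) (d0 : Int) :
    (d.erase k).getD j d0 = if j = k then d0 else d.getD j d0 := by
  rw [PySem.Dict.getD_eq_get?_getD, dict_get?_erase, PySem.Dict.getD_eq_get?_getD]
  by_cases hj : j = k <;> simp [hj]

lemma dict_size_keys (d : PySem.Dict Int Int) : d.size = d.keys.length := by
  simp [PySem.Dict.size, PySem.Dict.keys]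

lemma size_eq_dcount (bw : PySem.Dict Int Int) (l : List Int)
    (hnd : bw.keys.Nodup) (hmem : ∀ k : Int, bw.contains k = true ↔ k ∈ l) :
    bw.size = dcount l := by
  rw [dict_size_keys]
  have hp : bw.keys.Perm (PySem.Set.ofList l) := by
    rw [List.perm_ext_iff_of_nodup hnd (PySem.Set.nodup_ofList l)]
    intro a
    rw [← PySem.Dict.contains_iff_mem_keys, hmem a, PySem.Set.mem_ofList]
  exact hp.length_eq

-- A's main loop computes pvCnt
lemma loopA (rest : List Int) : ∀ (pre : List Int) (ans : Int) (bw : PySem.Dict Int Int),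
    bw.keys.Nodup →
    (∀ k : Int, bw.getD k 0 = (rest.count k : Int)) →
    (∀ k : Int, bw.contains k = true ↔ k ∈ rest) →
    (rest.foldl solStepA (ans, PySem.Set.ofList pre, bw)).1 = ans + pvCnt pre rest := by
  induction rest with
  | nil => intro pre ans bw _ _ _; simp [pvCnt]
  | cons x r' ih =>
      intro pre ans bw hnd hget hmem
      have hc : bw.contains x = true := (hmem x).mpr (by simp)
      have hfw : PySem.Set.add (PySem.Set.ofList pre) x = PySem.Set.ofList (pre ++ [x]) :=
        (PySem.Set.ofList_append_singleton pre x).symm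
      have hgx : bw.getD x 0 = ((r'.count x : Nat) : Int) + 1 := by
        rw [hget x, List.count_cons_self]; push_cast; simp
      have hbw1get : ∀ k : Int, (bw.modify x 0 (· - 1)).getD k 0 = (r'.count k : Int) := by
        intro k
        rw [PySem.Dict.getD_modify]
        by_cases hk : k = x
        · subst hk; rw [if_pos rfl, hgx]; ring
        · rw [if_neg hk, hget k, List.count_cons_of_ne (Ne.symm hk)]
      have hnd1 : (bw.modify x 0 (· - 1)).keys.Nodup := by
        rw [PySem.Dict.keys_modify, PySem.Dict.keys_insert_of_contains _ _ hc]
        exact hnd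
      have hkeys1 : (bw.modify x 0 (· - 1)).keys = bw.keys := by
        rw [PySem.Dict.keys_modify, PySem.Dict.keys_insert_of_contains _ _ hc]
      by_cases hx : x ∈ r'
      · -- the topping still occurs on the right: no deletion
        have hne : ¬ (bw.modify x 0 (· - 1)).getD x 0 = 0 := by
          rw [hbw1get x]
          have : 0 < r'.count x := List.count_pos_iff.mpr hx
          omega
        have hmem1 : ∀ k : Int, (bw.modify x 0 (· - 1)).contains k = true ↔ k ∈ r' := by
          intro k
          rw [PySem.Dict.contains_modify]
          simp only [Bool.or_eq_true, beq_iff_eq]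
          rw [hmem k]
          constructor
          · rintro (h | h)
            · exact h ▸ hx
            · rcases List.mem_cons.mp h with h | h
              · exact h ▸ hx
              · exact h
          · intro h; right; exact List.mem_cons_of_mem _ h
        have hsz : (bw.modify x 0 (· - 1)).size = dcount r' :=
          size_eq_dcount _ _ hnd1 hmem1
        have hstep : solStepA (ans, PySem.Set.ofList pre, bw) x
            = ((if dcount (pre ++ [x]) = dcount r' then ans + 1 else ans),
               PySem.Set.ofList (pre ++ [x]), bw.modify x 0 (· - 1)) := by
          simp only [solStepA]
          rw [if_neg hne, hfw, hsz]
          rfl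
        rw [List.foldl_cons, hstep,
            ih (pre ++ [x]) _ _ hnd1 hbw1get hmem1, pvCnt]
        split_ifs <;> ring
      · -- last occurrence on the right: the key is deleted
        have heq0 : (bw.modify x 0 (· - 1)).getD x 0 = 0 := by
          rw [hbw1get x]; simp [List.count_eq_zero_of_not_mem hx]
        have hnd2 : ((bw.modify x 0 (· - 1)).erase x).keys.Nodup := by
          rw [dict_keys_erase]; exact hnd1.filter _
        have hget2 : ∀ k : Int, ((bw.modify x 0 (· - 1)).erase x).getD k 0 = (r'.count k : Int) := by
          intro k
          rw [dict_getD_erase]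
          by_cases hk : k = x
          · subst hk; simp [List.count_eq_zero_of_not_mem hx]
          · rw [if_neg hk, hbw1get k]
        have hmem2 : ∀ k : Int, ((bw.modify x 0 (· - 1)).erase x).contains k = true ↔ k ∈ r' := by
          intro k
          rw [PySem.Dict.contains_iff_mem_keys, dict_keys_erase, List.mem_filter, hkeys1]
          rw [← PySem.Dict.contains_iff_mem_keys, hmem k]
          constructor
          · rintro ⟨hk1, hk2⟩
            have hk2' : k ≠ x := by simpa using hk2
            rcases List.mem_cons.mp hk1 with h | h
            · exact absurd h hk2'
            · exact h
          · intro hk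
            have hkx : k ≠ x := fun h => hx (h ▸ hk)
            exact ⟨List.mem_cons_of_mem _ hk, by simpa using hkx⟩
        have hsz : ((bw.modify x 0 (· - 1)).erase x).size = dcount r' :=
          size_eq_dcount _ _ hnd2 hmem2
        have hstep : solStepA (ans, PySem.Set.ofList pre, bw) x
            = ((if dcount (pre ++ [x]) = dcount r' then ans + 1 else ans),
               PySem.Set.ofList (pre ++ [x]), (bw.modify x 0 (· - 1)).erase x) := by
          simp only [solStepA]
          rw [if_pos heq0, hfw, hsz]
          rfl
        rw [List.foldl_cons, hstep,
            ih (pre ++ [x]) _ _ hnd2 hget2 hmem2, pvCnt]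
        split_ifs <;> ring

-- B's right-to-left pass, characterised
lemma revloop (l : List Int) : ∀ (acc : List Int) (s : PySem.Set Int),
    l.foldl
      (fun (st : List Int × PySem.Set Int) t =>
        (st.1 ++ [(st.2.length : Int)], PySem.Set.add st.2 t)) (acc, s)
    = (acc ++ (List.range l.length).map
        (fun k => ((PySem.Set.update s (l.take k)).length : Int)), PySem.Set.update s l) := by
  induction l with
  | nil => intro acc s; simp [PySem.Set.update_nil]
  | cons x l' ih =>
      intro acc s
      rw [List.foldl_cons, ih (acc ++ [(s.length : Int)]) (PySem.Set.add s x)]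
      simp only [Prod.mk.injEq]
      refine ⟨?_, ?_⟩
      · rw [List.length_cons, List.range_succ_eq_map, List.map_cons, List.map_map,
            List.append_assoc]
        congr 1
      · rw [PySem.Set.update_cons]

lemma altSuffix_eq (topping : List Int) :
    altSuffix topping
      = (((List.range topping.length).map
          (fun k => ((dcount (topping.reverse.take k) : Nat) : Int))).reverse) := by
  unfold altSuffix
  rw [revloop]
  simp only [List.nil_append, List.length_reverse]
  congr 1

lemma suffix_get (pre : List Int) (x : Int) (r' : List Int) :
    PySem.List.pyGetD (altSuffix (pre ++ x :: r')) ((pre.length : Int)) 0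
      = ((dcount r' : Nat) : Int) := by
  rw [altSuffix_eq]
  have hlen : (pre ++ x :: r').length = pre.length + r'.length + 1 := by
    simp; omega
  have hlt : pre.length < ((List.range (pre ++ x :: r').length).map
      (fun k => ((dcount ((pre ++ x :: r').reverse.take k) : Nat) : Int))).reverse.length := by
    simp [hlen]
  rw [PySem.List.pyGetD_natCast, List.getD_eq_getElem _ _ hlt, List.getElem_reverse,
      List.getElem_map]
  simp only [List.length_map, List.length_range]
  rw [List.getElem_range]
  rw [show (pre ++ x :: r').length - 1 - pre.length = r'.length by omega]
  have htake : (pre ++ x :: r').reverse.take r'.length = r'.reverse := by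
    rw [show (pre ++ x :: r').reverse = r'.reverse ++ (x :: pre.reverse) by simp,
        List.take_left' (by simp)]
  rw [htake]
  exact congrArg _ (dcount_perm (List.reverse_perm r'))

-- B's forward loop computes pvCnt
lemma loopB (topping : List Int) : ∀ (rest pre : List Int) (ans : Int),
    topping = pre ++ rest →
    ((PySem.List.enumerate rest ((pre.length : Int))).foldl
        (solStepB (altSuffix topping)) (ans, PySem.Set.ofList pre)).1
      = ans + pvCnt pre rest := by
  intro rest
  induction rest with
  | nil => intro pre ans _; simp [PySem.List.enumerate_nil, pvCnt]
  | cons x r' ih =>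
      intro pre ans htop
      have hfw : PySem.Set.add (PySem.Set.ofList pre) x = PySem.Set.ofList (pre ++ [x]) :=
        (PySem.Set.ofList_append_singleton pre x).symm
      have hsuf : PySem.List.pyGetD (altSuffix topping) ((pre.length : Int)) 0
          = ((dcount r' : Nat) : Int) := by
        rw [htop]; exact suffix_get pre x r'
      have hcond : (((PySem.Set.ofList (pre ++ [x])).length : Nat) : Int) = ((dcount r' : Nat) : Int)
          ↔ dcount (pre ++ [x]) = dcount r' := Int.natCast_inj
      have hidx : ((pre.length : Int)) + 1 = (((pre ++ [x]).length : Nat) : Int) := by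
        simp
      have hstep : solStepB (altSuffix topping) (ans, PySem.Set.ofList pre) ((pre.length : Int), x)
          = ((if dcount (pre ++ [x]) = dcount r' then ans + 1 else ans),
             PySem.Set.ofList (pre ++ [x])) := by
        simp only [solStepB]
        rw [hfw, hsuf, if_congr hcond rfl rfl]
      rw [PySem.List.enumerate_cons, List.foldl_cons, hstep, hidx,
          ih (pre ++ [x]) _ (by rw [htop]; simp), pvCnt]
      split_ifs <;> ring

-- ===== VERDICT (by name: the statement is the Claim_ definition above) =====
theorem solution_spec : Claim_equal_solution := by
  unfold Claim_equal_solution Spec_solution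
  intro topping _
  have hA : solution topping = 0 + pvCnt [] topping := by
    unfold solution
    rw [PySem.Dict.foldl_insert_getD_add_one_eq_counter]
    exact loopA topping [] 0 _ (PySem.Dict.nodup_keys_counter topping)
      (fun k => PySem.Dict.getD_counter topping k)
      (fun k => by rw [PySem.Dict.contains_counter]; simp)
  have hB : solution_alt topping = 0 + pvCnt [] topping := by
    unfold solution_alt
    have h := loopB topping topping [] 0 rfl
    simpa using h
  rw [hA, hB]
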